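-- pv_equiv track=rewrite | github.com/grasshopperTrainer/coding_practice | baekjoon/accepted/1091 카드 섞기.py | solution
-- ===== SOURCE A (Python) =====
-- def solution(N, P, S):
--     cards = tuple(range(N))
--
--     target = {}
--     for i, player in enumerate(P):
--         target.setdefault(player, set()).add(i)
--     if len(target) != 3:
--         return -1
--
--     visited = set()
--     count = 0
--     while True:
--         if cards in visited:
--             return -1
--
--         # collect
--         for i, c in enumerate(cards):
--             if c not in target[i % 3]:
--                 break
--         else:
--             return count
--         # shuffle
--         visited.add(tuple(cards))
--         shuffled = [0] * N
--         for i, pos in enumerate(S):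
--             shuffled[pos] = cards[i]
--         count += 1
--         cards = tuple(shuffled)
-- ===== SOURCE B (Python) =====
-- def solution(N, P, S):
--     target = {}
--     for i, player in enumerate(P):
--         target.setdefault(player, set()).add(i)
--     if len(target) != 3:
--         return -1
--
--     # order of the shuffle permutation S = lcm of its cycle lengths;
--     # after that many shuffles the cards are back to the start, so the
--     # search can stop there instead of maintaining a visited set.
--     order = 1
--     for i in range(N):
--         j = S[i]
--         length = 1
--         while j != i:
--             j = S[j]
--             length += 1
--         g, b = order, length
--         while b:
--             g, b = b, g % b
--         order = order * length // g
--
--     cards = list(range(N))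
--     for count in range(order):
--         if all(c in target[i % 3] for i, c in enumerate(cards)):
--             return count
--         shuffled = [0] * N
--         for i, pos in enumerate(S):
--             shuffled[pos] = cards[i]
--         cards = shuffled
--     return -1
-- ===== Notes on version B (the rewrite author's own statement) =====
-- stated objective: alternative
-- what changed: B replaces A's visited-set cycle detection by number theory: it decomposes the shuffle permutation S into cycles, computes the permutation's order as the lcm of the cycle lengths via a hand-rolled Euclidean gcd, and runs the same accept-then-shuffle simulation for at most that many steps, returning -1 when the loop bound is exhausted instead of maintaining a set of seen arrangements.
-- outside the precondition, e.g. on solution(1, [0, 1, 5], [0]): A returns 0, B returns 0; on solution(2, [1, 0, 2], [1, 1]): A returns -1, B does not finish within the time limit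
import Mathlib
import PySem

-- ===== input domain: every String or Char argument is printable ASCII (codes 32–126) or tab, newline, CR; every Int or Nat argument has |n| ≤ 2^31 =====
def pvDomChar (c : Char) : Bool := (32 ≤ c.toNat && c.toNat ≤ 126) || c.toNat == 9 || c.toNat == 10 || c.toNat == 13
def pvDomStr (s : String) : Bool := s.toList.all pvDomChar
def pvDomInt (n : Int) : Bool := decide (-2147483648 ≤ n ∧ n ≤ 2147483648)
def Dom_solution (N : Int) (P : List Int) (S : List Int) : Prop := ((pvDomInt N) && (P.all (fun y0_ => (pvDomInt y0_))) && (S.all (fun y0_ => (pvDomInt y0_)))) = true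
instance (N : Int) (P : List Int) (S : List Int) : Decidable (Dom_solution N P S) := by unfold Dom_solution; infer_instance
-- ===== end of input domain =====

-- B replaces A's visited-set cycle detection by the order (lcm of cycle lengths) of the
-- shuffle permutation, then runs the same simulation for at most that many steps (objective: alternative).

-- ===== PORT A =====

-- target = {}; for i, player in enumerate(P): target.setdefault(player, set()).add(i)
def pvTargetA (P : List Int) : PySem.Dict Int (PySem.Set Int) :=
  (PySem.List.enumerate P 0).foldl
    (fun d p => d.modify p.2 PySem.Set.empty (fun s => PySem.Set.add s p.1)) PySem.Dict.empty

-- the for-else acceptance check over enumerate(cards): none = KeyError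
def pvAcceptA (target : PySem.Dict Int (PySem.Set Int)) : List (Int × Int) → Option Bool
  | [] => some true
  | (i, c) :: rest =>
    match target.get? (PySem.Int.mod i 3) with
    | none => none
    | some s => if PySem.Set.contains s c then pvAcceptA target rest else some false

-- shuffled = [0]*N; for i, pos in enumerate(S): shuffled[pos] = cards[i]  (none = IndexError)
def pvShuffleA (cards : List Int) : List (Int × Int) → List Int → Option (List Int)
  | [], sh => some sh
  | (i, pos) :: rest, sh =>
    match PySem.List.pyGet? cards i with
    | none => none
    | some c =>
      match PySem.List.pySet? sh pos c with
      | none => none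
      | some sh' => pvShuffleA cards rest sh'

-- the while-True loop; fuel only makes the recursion total (proved sufficient under Pre_)
def pvLoopA (target : PySem.Dict Int (PySem.Set Int)) (N : Int) (S : List Int) :
    Nat → PySem.Set (List Int) → List Int → Int → Option Int
  | 0, _, _, _ => none
  | fuel + 1, visited, cards, count =>
    if PySem.Set.contains visited cards then some (-1)
    else
      match pvAcceptA target (PySem.List.enumerate cards 0) with
      | none => none
      | some true => some count
      | some false =>
        match pvShuffleA cards (PySem.List.enumerate S 0) (List.replicate N.toNat 0) with
        | none => none
        | some sh => pvLoopA target N S fuel (PySem.Set.add visited cards) sh (count + 1)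

def solution (N : Int) (P : List Int) (S : List Int) : Int :=
  let cards := PySem.List.pyRange 0 N 1
  let target := pvTargetA P
  if target.size ≠ 3 then -1
  else (pvLoopA target N S (Nat.factorial S.length + 2) PySem.Set.empty cards 0).getD (-1)

-- ===== PORT B =====

def pvTargetB (P : List Int) : PySem.Dict Int (PySem.Set Int) :=
  (PySem.List.enumerate P 0).foldl
    (fun d p => d.modify p.2 PySem.Set.empty (fun s => PySem.Set.add s p.1)) PySem.Dict.empty

-- j = S[i]; length = 1; while j != i: j = S[j]; length += 1   (fuel only for totality)
def pvCycleWalk (S : List Int) (i : Int) : Nat → Int → Int → Int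
  | 0, _, length => length
  | fuel + 1, j, length =>
    if j = i then length else pvCycleWalk S i fuel (PySem.List.pyGetD S j 0) (length + 1)

-- g, b = order, length; while b: g, b = b, g % b
def pvGcd (g b : Int) : Int :=
  if h : b = 0 then g else pvGcd b (PySem.Int.mod g b)
termination_by b.natAbs
decreasing_by
  rcases lt_trichotomy b 0 with hb | hb | hb
  · have h1 := (PySem.Int.mod_neg_bounds g hb).1
    have h2 := (PySem.Int.mod_neg_bounds g hb).2
    omega
  · exact absurd hb h
  · have h1 := PySem.Int.mod_nonneg g hb
    have h2 := PySem.Int.mod_lt g hb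
    omega

-- order = 1; for i in range(N): cycle walk, then order = order * length // gcd
def pvOrder (N : Int) (S : List Int) : Int :=
  (PySem.List.pyRange 0 N 1).foldl
    (fun order i =>
      let length := pvCycleWalk S i (S.length + 1) (PySem.List.pyGetD S i 0) 1
      PySem.Int.floordiv (order * length) (pvGcd order length))
    1

-- all(c in target[i % 3] for i, c in enumerate(cards))
def pvAcceptB (target : PySem.Dict Int (PySem.Set Int)) (cards : List Int) : Bool :=
  (PySem.List.enumerate cards 0).all
    (fun p => PySem.Set.contains (target.getD (PySem.Int.mod p.1 3) PySem.Set.empty) p.2)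

def pvShuffleB (N : Int) (S : List Int) (cards : List Int) : List Int :=
  (PySem.List.enumerate S 0).foldl
    (fun sh p => PySem.List.pySetD sh p.2 (PySem.List.pyGetD cards p.1 0))
    (List.replicate N.toNat 0)

-- for count in range(order): accept-check, else shuffle; after the loop return -1
def pvLoopB (target : PySem.Dict Int (PySem.Set Int)) (N : Int) (S : List Int) :
    Nat → List Int → Int → Int
  | 0, _, _ => -1
  | f + 1, cards, count =>
    if pvAcceptB target cards then count
    else pvLoopB target N S f (pvShuffleB N S cards) (count + 1)

def solution_alt (N : Int) (P : List Int) (S : List Int) : Int :=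
  let target := pvTargetB P
  if target.size ≠ 3 then -1
  else pvLoopB target N S (pvOrder N S).toNat (PySem.List.pyRange 0 N 1) 0

-- ===== PRECONDITION & SPEC =====

-- Pre_ excludes inputs where P has exactly 3 distinct values other than {0,1,2} (A can raise
-- KeyError there) and inputs where S is not a permutation of range(N) (A can raise IndexError,
-- wrap negative indices or zero-fill there, and B's cycle walk assumes a permutation).
def Pre_solution (N : Int) (P : List Int) (S : List Int) : Prop :=
  (PySem.Set.ofList P).length ≠ 3 ∨
  ((S.length : Int) = N ∧ (∀ x ∈ S, 0 ≤ x ∧ x < N) ∧ S.Nodup ∧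
    (0 : Int) ∈ P ∧ (1 : Int) ∈ P ∧ (2 : Int) ∈ P)
instance (N : Int) (P : List Int) (S : List Int) : Decidable (Pre_solution N P S) := by
  unfold Pre_solution; infer_instance

def pvWitness_solution : Int × List Int × List Int := (3, [0, 1, 2], [1, 2, 0])

def Spec_solution (N : Int) (P : List Int) (S : List Int) (out : Int) : Prop := out = solution_alt N P S
instance (N : Int) (P : List Int) (S : List Int) (out : Int) : Decidable (Spec_solution N P S out) := by unfold Spec_solution; infer_instance

-- ===== CLAIM (what is proved, stated in full; the proofs are below) =====
def Claim_equal_solution : Prop := ∀ (N : Int) (P : List Int) (S : List Int), Dom_solution N P S → Pre_solution N P S → Spec_solution N P S (solution N P S)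

-- ===== LEMMAS AND PROOFS =====

-- τ, the shuffle permutation as a function on positions
def pvTau (S : List Int) (j : Nat) : Nat := (PySem.List.pyGetD S (j : Int) 0).toNat

-- the t-th card arrangement of B's simulation
def pvX (N : Int) (S : List Int) (t : Nat) : List Int :=
  (pvShuffleB N S)^[t] (PySem.List.pyRange 0 N 1)

theorem pvTau_spec {S : List Int} (hr : ∀ x ∈ S, 0 ≤ x ∧ x < (S.length : Int))
    {j : Nat} (hj : j < S.length) :
    ((pvTau S j : Int) = PySem.List.pyGetD S (j : Int) 0) ∧ pvTau S j < S.length := by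
  have hg : PySem.List.pyGetD S (j : Int) 0 = S[j] := by
    rw [PySem.List.pyGetD_natCast, List.getD_eq_getElem?_getD, List.getElem?_eq_getElem hj]
    rfl
  have hmem : S[j] ∈ S := List.getElem_mem hj
  have hb := hr _ hmem
  unfold pvTau
  rw [hg]
  constructor
  · exact Int.toNat_of_nonneg hb.1
  · omega

theorem pvTau_lt {S : List Int} (hr : ∀ x ∈ S, 0 ≤ x ∧ x < (S.length : Int))
    {j : Nat} (hj : j < S.length) : pvTau S j < S.length :=
  (pvTau_spec hr hj).2

theorem pvTau_iter_lt {S : List Int} (hr : ∀ x ∈ S, 0 ≤ x ∧ x < (S.length : Int))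
    {i : Nat} (hi : i < S.length) (t : Nat) : (pvTau S)^[t] i < S.length := by
  induction t with
  | zero => simpa using hi
  | succ t ih =>
    rw [Function.iterate_succ_apply']
    exact pvTau_lt hr ih

theorem pvTau_inj {S : List Int} (hr : ∀ x ∈ S, 0 ≤ x ∧ x < (S.length : Int))
    (hnd : S.Nodup) {j1 j2 : Nat} (h1 : j1 < S.length) (h2 : j2 < S.length)
    (he : pvTau S j1 = pvTau S j2) : j1 = j2 := by
  have e1 := (pvTau_spec hr h1).1
  have e2 := (pvTau_spec hr h2).1
  have hg1 : PySem.List.pyGetD S (j1 : Int) 0 = S[j1] := by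
    rw [PySem.List.pyGetD_natCast, List.getD_eq_getElem?_getD, List.getElem?_eq_getElem h1]; rfl
  have hg2 : PySem.List.pyGetD S (j2 : Int) 0 = S[j2] := by
    rw [PySem.List.pyGetD_natCast, List.getD_eq_getElem?_getD, List.getElem?_eq_getElem h2]; rfl
  have : S[j1] = S[j2] := by rw [← hg1, ← hg2, ← e1, ← e2, he]
  exact (List.Nodup.getElem_inj_iff hnd).mp this

theorem pvTau_iter_cancel {S : List Int} (hr : ∀ x ∈ S, 0 ≤ x ∧ x < (S.length : Int))
    (hnd : S.Nodup) {i j : Nat} (hi : i < S.length) (hj : j < S.length) (a : Nat)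
    (he : (pvTau S)^[a] i = (pvTau S)^[a] j) : i = j := by
  induction a generalizing i j with
  | zero => simpa using he
  | succ a ih =>
    rw [Function.iterate_succ_apply', Function.iterate_succ_apply'] at he
    have := pvTau_inj hr hnd (pvTau_iter_lt hr hi a) (pvTau_iter_lt hr hj a) he
    exact ih hi hj this

theorem pvTau_mem_periodicPts {S : List Int} (hr : ∀ x ∈ S, 0 ≤ x ∧ x < (S.length : Int))
    (hnd : S.Nodup) {i : Nat} (hi : i < S.length) :
    i ∈ Function.periodicPts (pvTau S) ∧ Function.minimalPeriod (pvTau S) i ≤ S.length := by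
  have hpig : ∃ a ∈ Finset.range (S.length + 1), ∃ b ∈ Finset.range (S.length + 1),
      a ≠ b ∧ (pvTau S)^[a] i = (pvTau S)^[b] i := by
    apply Finset.exists_ne_map_eq_of_card_lt_of_maps_to (t := Finset.range S.length)
    · simp
    · intro a _
      exact Finset.mem_coe.mpr (Finset.mem_range.mpr (pvTau_iter_lt hr hi a))
  obtain ⟨a, _, b, _, hab, he⟩ := hpig
  rcases Nat.lt_or_ge a b with hlt | hge
  · have : (pvTau S)^[a] i = (pvTau S)^[a] ((pvTau S)^[b - a] i) := by
      rw [← Function.iterate_add_apply]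
      rw [show a + (b - a) = b by omega]
      exact he
    have hper : (pvTau S)^[b - a] i = i :=
      (pvTau_iter_cancel hr hnd (pvTau_iter_lt hr hi (b - a)) hi a this.symm)
    have hP : Function.IsPeriodicPt (pvTau S) (b - a) i := hper
    have hpos : 0 < b - a := by omega
    refine ⟨⟨b - a, hpos, hP⟩, ?_⟩
    calc Function.minimalPeriod (pvTau S) i ≤ b - a :=
          Function.IsPeriodicPt.minimalPeriod_le hpos hP
      _ ≤ S.length := by
          have : b < S.length + 1 := by
            have := Finset.mem_range.mp (by assumption : b ∈ Finset.range (S.length + 1))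
            exact this
          omega
  · have : (pvTau S)^[b] i = (pvTau S)^[b] ((pvTau S)^[a - b] i) := by
      rw [← Function.iterate_add_apply]
      rw [show b + (a - b) = a by omega]
      exact he.symm
    have hper : (pvTau S)^[a - b] i = i :=
      (pvTau_iter_cancel hr hnd (pvTau_iter_lt hr hi (a - b)) hi b this.symm)
    have hP : Function.IsPeriodicPt (pvTau S) (a - b) i := hper
    have hpos : 0 < a - b := by omega
    refine ⟨⟨a - b, hpos, hP⟩, ?_⟩
    calc Function.minimalPeriod (pvTau S) i ≤ a - b :=
          Function.IsPeriodicPt.minimalPeriod_le hpos hP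
      _ ≤ S.length := by
          have : a < S.length + 1 := by
            have := Finset.mem_range.mp (by assumption : a ∈ Finset.range (S.length + 1))
            exact this
          omega

theorem pvCycleWalk_eq {S : List Int} (hr : ∀ x ∈ S, 0 ≤ x ∧ x < (S.length : Int))
    (hnd : S.Nodup) {i : Nat} (hi : i < S.length) :
    pvCycleWalk S (i : Int) (S.length + 1) (PySem.List.pyGetD S (i : Int) 0) 1 =
      (Function.minimalPeriod (pvTau S) i : Int) := by
  obtain ⟨hmem, hle⟩ := pvTau_mem_periodicPts hr hnd hi
  set c := Function.minimalPeriod (pvTau S) i with hc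
  have hcpos : 0 < c := Function.minimalPeriod_pos_of_mem_periodicPts hmem
  have hciter : (pvTau S)^[c] i = i := Function.iterate_minimalPeriod
  have key : ∀ f l, 1 ≤ l → l ≤ c → c ≤ l + f →
      pvCycleWalk S (i : Int) f ((((pvTau S)^[l] i : Nat)) : Int) (l : Int) = (c : Int) := by
    intro f
    induction f with
    | zero =>
      intro l h1 h2 h3
      have : l = c := by omega
      subst this
      simp [pvCycleWalk]
    | succ f ih =>
      intro l h1 h2 h3
      by_cases he : (pvTau S)^[l] i = i
      · have hP : Function.IsPeriodicPt (pvTau S) l i := he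
        have hdvd : c ∣ l := Function.IsPeriodicPt.minimalPeriod_dvd hP
        have : c ≤ l := Nat.le_of_dvd (by omega) hdvd
        have hlc : l = c := by omega
        subst hlc
        simp [pvCycleWalk, he]
      · have hlc : l < c := by
          rcases Nat.lt_or_ge l c with h | h
          · exact h
          · exact absurd (by rw [show l = c by omega]; exact hciter) he
        have hne : (((pvTau S)^[l] i : Nat) : Int) ≠ (i : Int) := by
          intro hh
          exact he (by exact_mod_cast hh)
        have hstep : PySem.List.pyGetD S (((pvTau S)^[l] i : Nat) : Int) 0 =
            (((pvTau S)^[l + 1] i : Nat) : Int) := by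
          have hlt := pvTau_iter_lt hr hi l
          have := (pvTau_spec hr hlt).1
          rw [← this, Function.iterate_succ_apply']
        have := ih (l + 1) (by omega) (by omega) (by omega)
        simp only [pvCycleWalk, if_neg hne]
        rw [hstep]
        rw [show ((l : Int) + 1) = ((l + 1 : Nat) : Int) by push_cast; ring]
        exact this
  have hstart : PySem.List.pyGetD S (i : Int) 0 = (((pvTau S)^[1] i : Nat) : Int) := by
    have := (pvTau_spec hr hi).1
    rw [← this]
    rfl
  rw [hstart]
  exact key (S.length + 1) 1 le_rfl hcpos (by omega)

theorem pvGcd_eq (a b : Nat) : pvGcd (a : Int) (b : Int) = (Nat.gcd a b : Int) := by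
  induction b using Nat.strong_induction_on generalizing a with
  | _ b ih =>
    unfold pvGcd
    by_cases hb : (b : Int) = 0
    · have hb0 : b = 0 := by exact_mod_cast hb
      subst hb0
      simp
    · rw [dif_neg hb]
      have hbpos : 0 < b := by
        rcases Nat.eq_zero_or_pos b with h | h
        · exact absurd (by simp [h]) hb
        · exact h
      have hmod : PySem.Int.mod (a : Int) (b : Int) = ((a % b : Nat) : Int) :=
        PySem.Int.mod_natCast a b
      rw [hmod, ih (a % b) (Nat.mod_lt _ hbpos) b]
      rw [Nat.gcd_comm b (a % b), ← Nat.gcd_rec b a, Nat.gcd_comm b a]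

-- the Nat-level order
noncomputable def pvLNat (S : List Int) : Nat :=
  (List.range S.length).foldl (fun o i => Nat.lcm o (Function.minimalPeriod (pvTau S) i)) 1

theorem pvOrder_eq {S : List Int} (hr : ∀ x ∈ S, 0 ≤ x ∧ x < (S.length : Int))
    (hnd : S.Nodup) : pvOrder (S.length : Int) S = (pvLNat S : Int) := by
  unfold pvOrder pvLNat
  rw [PySem.List.pyRange_zero_nat, List.foldl_map]
  have aux : ∀ (l : List Nat), (∀ i ∈ l, i < S.length) → ∀ (o : Nat), 0 < o →
      l.foldl (fun (order : Int) (i : Nat) =>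
        let length := pvCycleWalk S ((i : Nat) : Int) (S.length + 1)
          (PySem.List.pyGetD S ((i : Nat) : Int) 0) 1
        PySem.Int.floordiv (order * length) (pvGcd order length)) ((o : Nat) : Int) =
      ((l.foldl (fun o i => Nat.lcm o (Function.minimalPeriod (pvTau S) i)) o : Nat) : Int) := by
    intro l
    induction l with
    | nil => intro _ o _; rfl
    | cons i l' ihl =>
      intro hl o ho
      have hi : i < S.length := hl i (List.mem_cons_self ..)
      have hc := pvCycleWalk_eq hr hnd hi
      set c := Function.minimalPeriod (pvTau S) i with hcdef
      have hcpos : 0 < c :=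
        Function.minimalPeriod_pos_of_mem_periodicPts (pvTau_mem_periodicPts hr hnd hi).1
      simp only [List.foldl_cons]
      rw [hc, pvGcd_eq o c]
      rw [show ((o : Int) * (c : Int)) = ((o * c : Nat) : Int) by push_cast; ring]
      rw [PySem.Int.floordiv_natCast]
      rw [show (o * c / Nat.gcd o c) = Nat.lcm o c from rfl]
      exact ihl (fun x hx => hl x (List.mem_cons_of_mem _ hx)) (Nat.lcm o c)
        (Nat.pos_of_ne_zero (Nat.lcm_ne_zero (by omega) (by omega)))
  exact aux (List.range S.length) (fun i h => List.mem_range.mp h) 1 one_pos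

theorem pvLNat_props {S : List Int} (hr : ∀ x ∈ S, 0 ≤ x ∧ x < (S.length : Int))
    (hnd : S.Nodup) :
    0 < pvLNat S ∧ pvLNat S ≤ Nat.factorial S.length ∧
    (∀ i < S.length, (pvTau S)^[pvLNat S] i = i) ∧
    (∀ u, 0 < u → u < pvLNat S → ∃ i < S.length, (pvTau S)^[u] i ≠ i) := by
  have hcpos : ∀ i < S.length, 0 < Function.minimalPeriod (pvTau S) i := fun i hi =>
    Function.minimalPeriod_pos_of_mem_periodicPts (pvTau_mem_periodicPts hr hnd hi).1
  have hcle : ∀ i < S.length, Function.minimalPeriod (pvTau S) i ≤ S.length := fun i hi =>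
    (pvTau_mem_periodicPts hr hnd hi).2
  -- generic foldl-lcm facts
  have hpos : ∀ (l : List Nat), (∀ i ∈ l, i < S.length) → ∀ o, 0 < o →
      0 < l.foldl (fun a i => Nat.lcm a (Function.minimalPeriod (pvTau S) i)) o := by
    intro l
    induction l with
    | nil => intro _ o ho; exact ho
    | cons i l' ih =>
      intro hl o ho
      exact ih (fun x hx => hl x (List.mem_cons_of_mem _ hx)) _
        (Nat.pos_of_ne_zero (Nat.lcm_ne_zero (by omega)
          (by have := hcpos i (hl i (List.mem_cons_self ..)); omega)))
  have hdvd : ∀ (l : List Nat) (m : Nat), ∀ o, o ∣ m →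
      (∀ i ∈ l, Function.minimalPeriod (pvTau S) i ∣ m) →
      l.foldl (fun a i => Nat.lcm a (Function.minimalPeriod (pvTau S) i)) o ∣ m := by
    intro l m
    induction l with
    | nil => intro o ho _; exact ho
    | cons i l' ih =>
      intro o ho hl
      exact ih _ (Nat.lcm_dvd ho (hl i (List.mem_cons_self ..)))
        (fun x hx => hl x (List.mem_cons_of_mem _ hx))
  have hacc : ∀ (l : List Nat) (o : Nat),
      o ∣ l.foldl (fun a i => Nat.lcm a (Function.minimalPeriod (pvTau S) i)) o := by
    intro l
    induction l with
    | nil => intro o; exact dvd_rfl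
    | cons i l' ih =>
      intro o
      exact dvd_trans (Nat.dvd_lcm_left _ _) (ih _)
  have hmem : ∀ (l : List Nat) (o : Nat) (i : Nat), i ∈ l →
      Function.minimalPeriod (pvTau S) i ∣
        l.foldl (fun a i => Nat.lcm a (Function.minimalPeriod (pvTau S) i)) o := by
    intro l
    induction l with
    | nil => intro o i h; exact absurd h (List.not_mem_nil)
    | cons j l' ih =>
      intro o i h
      rcases List.mem_cons.mp h with h | h
      · subst h
        exact dvd_trans (Nat.dvd_lcm_right _ _) (hacc l' _)
      · exact ih _ i h
  have hLpos : 0 < pvLNat S :=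
    hpos (List.range S.length) (fun i h => List.mem_range.mp h) 1 one_pos
  refine ⟨hLpos, ?_, ?_, ?_⟩
  · have : pvLNat S ∣ Nat.factorial S.length := by
      apply hdvd
      · exact Nat.one_dvd _
      · intro i hi
        exact Nat.dvd_factorial (hcpos i (List.mem_range.mp hi)) (hcle i (List.mem_range.mp hi))
    exact Nat.le_of_dvd (Nat.factorial_pos _) this
  · intro i hi
    obtain ⟨k, hk⟩ := hmem (List.range S.length) 1 i (List.mem_range.mpr hi)
    have hP : Function.IsPeriodicPt (pvTau S) (Function.minimalPeriod (pvTau S) i) i :=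
      Function.iterate_minimalPeriod
    have := hP.mul_const k
    unfold pvLNat
    rw [hk]
    exact this
  · intro u hu hul
    by_contra hcon
    push_neg at hcon
    have : pvLNat S ∣ u := by
      apply hdvd
      · exact Nat.one_dvd _
      · intro i hi
        exact Function.IsPeriodicPt.minimalPeriod_dvd (hcon i (List.mem_range.mp hi))
    have := Nat.le_of_dvd hu this
    omega


-- generic facts about the scatter fold used by both shuffles
theorem pvScatter_len (cards : List Int) (l : List (Int × Int)) :
    ∀ acc : List Int,
      (l.foldl (fun sh p => PySem.List.pySetD sh p.2 (PySem.List.pyGetD cards p.1 0)) acc).length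
        = acc.length := by
  induction l with
  | nil => intro acc; rfl
  | cons p l' ih =>
    intro acc
    rw [List.foldl_cons, ih]
    exact PySem.List.length_pySetD ..

theorem pvScatter_untouched (cards : List Int) (l : List (Int × Int)) :
    ∀ (acc : List Int) (pos : Nat), (∀ p ∈ l, 0 ≤ p.2) → ((pos : Int) ∉ l.map (·.2)) →
      (l.foldl (fun sh p => PySem.List.pySetD sh p.2 (PySem.List.pyGetD cards p.1 0)) acc).getD pos 0
        = acc.getD pos 0 := by
  induction l with
  | nil => intro acc pos _ _; rfl
  | cons p l' ih =>
    intro acc pos hnn hpos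
    rw [List.foldl_cons]
    have hp2 : 0 ≤ p.2 := hnn p (List.mem_cons_self ..)
    have hpos' : ((pos : Int)) ∉ l'.map (·.2) := fun h => hpos (by
      rw [List.map_cons]; exact List.mem_cons_of_mem _ h)
    rw [ih _ pos (fun q hq => hnn q (List.mem_cons_of_mem _ hq)) hpos']
    have hne : (pos : Int) ≠ p.2 := fun h => hpos (by
      rw [List.map_cons, h]; exact List.mem_cons_self ..)
    rw [PySem.List.pySetD_of_nonneg _ _ hp2]
    rw [List.getD_eq_getElem?_getD, List.getD_eq_getElem?_getD,
      List.getElem?_set_ne (by omega : p.2.toNat ≠ pos)]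

theorem pvScatter_spec (cards : List Int) (l : List (Int × Int)) :
    ∀ acc : List Int, (∀ p ∈ l, 0 ≤ p.2 ∧ p.2 < (acc.length : Int)) → (l.map (·.2)).Nodup →
      ∀ q ∈ l,
      (l.foldl (fun sh p => PySem.List.pySetD sh p.2 (PySem.List.pyGetD cards p.1 0)) acc).getD q.2.toNat 0
        = PySem.List.pyGetD cards q.1 0 := by
  induction l with
  | nil => intro acc _ _ q hq; exact absurd hq (List.not_mem_nil)
  | cons p l' ih =>
    intro acc hb hnd q hq
    have hp := hb p (List.mem_cons_self ..)
    have hlen' : (PySem.List.pySetD acc p.2 (PySem.List.pyGetD cards p.1 0)).length = acc.length :=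
      PySem.List.length_pySetD ..
    rcases List.mem_cons.mp hq with hq | hq
    · subst hq
      rw [List.foldl_cons]
      have hnd' := hnd
      rw [List.map_cons, List.nodup_cons] at hnd'
      have hnotin : ((q.2.toNat : Int)) ∉ l'.map (·.2) := by
        rw [Int.toNat_of_nonneg hp.1]
        exact hnd'.1
      rw [pvScatter_untouched cards l' _ q.2.toNat
        (fun r hr => (hb r (List.mem_cons_of_mem _ hr)).1) hnotin]
      rw [PySem.List.pySetD_of_nonneg _ _ hp.1]
      rw [List.getD_eq_getElem?_getD, List.getElem?_set_self (by
        have := hp.2; omega), Option.getD_some]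
    · rw [List.foldl_cons]
      exact ih _ (fun r hr => ⟨(hb r (List.mem_cons_of_mem _ hr)).1, by
          rw [hlen']; exact (hb r (List.mem_cons_of_mem _ hr)).2⟩)
        (by rw [List.map_cons, List.nodup_cons] at hnd; exact hnd.2) q hq

theorem pvShuffleB_length {N : Int} {S : List Int} (hN : (S.length : Int) = N)
    (cards : List Int) : (pvShuffleB N S cards).length = S.length := by
  unfold pvShuffleB
  rw [pvScatter_len]
  rw [List.length_replicate]
  omega

theorem pvShuffleB_getD {N : Int} {S : List Int} (hN : (S.length : Int) = N)
    (hr : ∀ x ∈ S, 0 ≤ x ∧ x < (S.length : Int)) (hnd : S.Nodup)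
    (cards : List Int) {i : Nat} (hi : i < S.length) :
    (pvShuffleB N S cards).getD (pvTau S i) 0 = cards.getD i 0 := by
  unfold pvShuffleB
  have hq : ((0 + (i : Int), S[i]) : Int × Int) ∈ PySem.List.enumerate S 0 :=
    (PySem.List.mem_enumerate_iff ..).mpr ⟨i, hi, rfl⟩
  have hbnd : ∀ p ∈ PySem.List.enumerate S 0,
      0 ≤ p.2 ∧ p.2 < ((List.replicate N.toNat (0 : Int)).length : Int) := by
    intro p hp
    rcases (PySem.List.mem_enumerate_iff ..).mp hp with ⟨k, hk, rfl⟩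
    have := hr S[k] (List.getElem_mem hk)
    rw [List.length_replicate]
    constructor
    · exact this.1
    · omega
  have hnd2 : ((PySem.List.enumerate S 0).map (·.2)).Nodup := by
    rw [PySem.List.map_snd_enumerate]
    exact hnd
  have := pvScatter_spec cards (PySem.List.enumerate S 0) (List.replicate N.toNat 0)
    hbnd hnd2 _ hq
  have htau : (S[i] : Int).toNat = pvTau S i := by
    unfold pvTau
    rw [PySem.List.pyGetD_natCast, List.getD_eq_getElem _ _ hi]
  rw [htau] at this
  rw [this]
  simp only [zero_add, PySem.List.pyGetD_natCast]

theorem pvX_length {N : Int} {S : List Int} (hN : (S.length : Int) = N) (t : Nat) :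
    (pvX N S t).length = S.length := by
  induction t with
  | zero =>
    unfold pvX
    rw [Function.iterate_zero_apply, PySem.List.length_pyRange_one]
    omega
  | succ t ih =>
    unfold pvX at *
    rw [Function.iterate_succ_apply']
    exact pvShuffleB_length hN _

theorem pvX_getD {N : Int} {S : List Int} (hN : (S.length : Int) = N)
    (hr : ∀ x ∈ S, 0 ≤ x ∧ x < (S.length : Int)) (hnd : S.Nodup)
    (t : Nat) {i : Nat} (hi : i < S.length) :
    (pvX N S t).getD ((pvTau S)^[t] i) 0 = (i : Int) := by
  induction t generalizing i with
  | zero =>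
    unfold pvX
    rw [Function.iterate_zero_apply, Function.iterate_zero_apply]
    have hlen : (PySem.List.pyRange 0 N 1).length = S.length := by
      rw [PySem.List.length_pyRange_one]; omega
    rw [List.getD_eq_getElem _ _ (by omega : i < (PySem.List.pyRange 0 N 1).length)]
    rw [PySem.List.getElem_pyRange_one]
    ring
  | succ t ih =>
    have hk := pvTau_iter_lt hr hi t
    unfold pvX at *
    rw [Function.iterate_succ_apply', Function.iterate_succ_apply']
    rw [pvShuffleB_getD hN hr hnd _ hk]
    exact ih hi

theorem pvX_eq_zero_iff {N : Int} {S : List Int} (hN : (S.length : Int) = N)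
    (hr : ∀ x ∈ S, 0 ≤ x ∧ x < (S.length : Int)) (hnd : S.Nodup) (t : Nat) :
    pvX N S t = pvX N S 0 ↔ ∀ i < S.length, (pvTau S)^[t] i = i := by
  constructor
  · intro h i hi
    have h1 := pvX_getD hN hr hnd t hi
    have hk := pvTau_iter_lt hr hi t
    have h2 := pvX_getD hN hr hnd 0 hk
    rw [Function.iterate_zero_apply] at h2
    rw [h] at h1
    rw [h1] at h2
    exact_mod_cast h2.symm
  · intro h
    apply List.ext_getElem (by rw [pvX_length hN, pvX_length hN])
    intro j h1 h2
    have hj : j < S.length := by rw [pvX_length hN] at h1; exact h1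
    have ht := pvX_getD hN hr hnd t hj
    rw [h j hj] at ht
    have h0 := pvX_getD hN hr hnd 0 hj
    rw [Function.iterate_zero_apply] at h0
    rw [List.getD_eq_getElem _ _ h1] at ht
    rw [List.getD_eq_getElem _ _ h2] at h0
    rw [ht, h0]

theorem pvShuffleB_inj {N : Int} {S : List Int} (hN : (S.length : Int) = N)
    (hr : ∀ x ∈ S, 0 ≤ x ∧ x < (S.length : Int)) (hnd : S.Nodup)
    {a b : List Int} (ha : a.length = S.length) (hb : b.length = S.length)
    (he : pvShuffleB N S a = pvShuffleB N S b) : a = b := by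
  apply List.ext_getElem (by rw [ha, hb])
  intro i h1 h2
  have hi : i < S.length := by rw [ha] at h1; exact h1
  have e1 := pvShuffleB_getD hN hr hnd a hi
  have e2 := pvShuffleB_getD hN hr hnd b hi
  rw [he] at e1
  rw [List.getD_eq_getElem _ _ h1] at e1
  rw [List.getD_eq_getElem _ _ h2] at e2
  rw [← e1, ← e2]

theorem pvX_shift {N : Int} {S : List Int} (hN : (S.length : Int) = N)
    (hr : ∀ x ∈ S, 0 ≤ x ∧ x < (S.length : Int)) (hnd : S.Nodup)
    (s t : Nat) (hst : s ≤ t) (he : pvX N S t = pvX N S s) :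
    pvX N S (t - s) = pvX N S 0 := by
  induction s generalizing t with
  | zero => simpa using he
  | succ s ih =>
    obtain ⟨t', rfl⟩ : ∃ t', t = t' + 1 := ⟨t - 1, by omega⟩
    have he' : pvShuffleB N S (pvX N S t') = pvShuffleB N S (pvX N S s) := by
      have a1 : pvX N S (t' + 1) = pvShuffleB N S (pvX N S t') := by
        unfold pvX; rw [Function.iterate_succ_apply']
      have a2 : pvX N S (s + 1) = pvShuffleB N S (pvX N S s) := by
        unfold pvX; rw [Function.iterate_succ_apply']
      rw [← a1, ← a2]; exact he
    have := pvShuffleB_inj hN hr hnd (pvX_length hN t') (pvX_length hN s) he'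
    have := ih t' (by omega) this
    rw [show t' + 1 - (s + 1) = t' - s by omega]
    exact this

theorem pvX_distinct {N : Int} {S : List Int} (hN : (S.length : Int) = N)
    (hr : ∀ x ∈ S, 0 ≤ x ∧ x < (S.length : Int)) (hnd : S.Nodup)
    {s t : Nat} (hs : s < t) (ht : t < pvLNat S) : pvX N S t ≠ pvX N S s := by
  intro he
  have h0 := pvX_shift hN hr hnd s t (by omega) he
  have hall := (pvX_eq_zero_iff hN hr hnd (t - s)).mp h0
  obtain ⟨-, -, -, hmin⟩ := pvLNat_props hr hnd
  obtain ⟨i, hi, hne⟩ := hmin (t - s) (by omega) (by omega)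
  exact hne (hall i hi)

theorem pvAccept_agree (target : PySem.Dict Int (PySem.Set Int))
    (hk : ∀ k : Int, 0 ≤ k → k < 3 → (target.get? k).isSome)
    (cards : List Int) :
    pvAcceptA target (PySem.List.enumerate cards 0) = some (pvAcceptB target cards) := by
  unfold pvAcceptB
  suffices h : ∀ (cs : List Int) (st : Int),
      pvAcceptA target (PySem.List.enumerate cs st) =
        some ((PySem.List.enumerate cs st).all
          (fun p => PySem.Set.contains (target.getD (PySem.Int.mod p.1 3) PySem.Set.empty) p.2)) by
    exact h cards 0
  intro cs
  induction cs with
  | nil => intro st; rfl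
  | cons c cs ih =>
    intro st
    rw [PySem.List.enumerate_cons]
    have h0 : 0 ≤ PySem.Int.mod st 3 := PySem.Int.mod_nonneg st (by norm_num)
    have h3 : PySem.Int.mod st 3 < 3 := PySem.Int.mod_lt st (by norm_num)
    obtain ⟨v, hv⟩ := Option.isSome_iff_exists.mp (hk _ h0 h3)
    have hgd : target.getD (PySem.Int.mod st 3) PySem.Set.empty = v := by
      rw [PySem.Dict.getD_eq_get?_getD, hv]; rfl
    by_cases hc : PySem.Set.contains v c = true
    · simp only [pvAcceptA, hv, hc, if_pos, List.all_cons, hgd, Bool.true_and]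
      exact ih (st + 1)
    · simp only [pvAcceptA, hv, List.all_cons, hgd]
      rw [if_neg hc]
      simp only [Bool.not_eq_true] at hc
      rw [hc, Bool.false_and]

theorem pvTargetA_keys (P : List Int) : (pvTargetA P).keys = PySem.Set.ofList P := by
  unfold pvTargetA
  rw [PySem.Dict.keys_foldl_modify_key (PySem.List.enumerate P 0) (fun p => p.2)
    PySem.Set.empty (fun _ p s => PySem.Set.add s p.1) PySem.Dict.empty]
  rw [PySem.List.map_snd_enumerate]
  exact PySem.Set.update_nil_left P

theorem pvTargetA_size (P : List Int) : (pvTargetA P).size = (PySem.Set.ofList P).length := by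
  have h : (pvTargetA P).size = (pvTargetA P).keys.length := by
    simp [PySem.Dict.size, PySem.Dict.keys]
  rw [h, pvTargetA_keys]

theorem pvTargetA_isSome {P : List Int} {k : Int} (hk : k ∈ P) :
    ((pvTargetA P).get? k).isSome := by
  rcases hg : (pvTargetA P).get? k with _ | v
  · exfalso
    have := (PySem.Dict.get?_eq_none_iff_not_mem_keys ..).mp hg
    rw [pvTargetA_keys] at this
    exact this ((PySem.Set.mem_ofList ..).mpr hk)
  · rfl

theorem pvShuffleA_eq {N : Int} {S : List Int} (hN : (S.length : Int) = N)
    (hr : ∀ x ∈ S, 0 ≤ x ∧ x < (S.length : Int))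
    (cards : List Int) (hc : cards.length = S.length) :
    pvShuffleA cards (PySem.List.enumerate S 0) (List.replicate N.toNat 0) =
      some (pvShuffleB N S cards) := by
  unfold pvShuffleB
  suffices h : ∀ (l : List (Int × Int)) (acc : List Int),
      (∀ p ∈ l, (0 ≤ p.1 ∧ p.1 < (cards.length : Int)) ∧ (0 ≤ p.2 ∧ p.2 < (acc.length : Int))) →
      pvShuffleA cards l acc =
        some (l.foldl (fun sh p => PySem.List.pySetD sh p.2 (PySem.List.pyGetD cards p.1 0)) acc) by
    apply h
    intro p hp
    rcases (PySem.List.mem_enumerate_iff ..).mp hp with ⟨k, hk, rfl⟩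
    have hb := hr S[k] (List.getElem_mem hk)
    rw [List.length_replicate]
    constructor
    · constructor
      · omega
      · simp only [zero_add]
        rw [hc]
        exact_mod_cast hk
    · constructor
      · exact hb.1
      · omega
  intro l
  induction l with
  | nil => intro acc _; rfl
  | cons p l' ih =>
    intro acc hb
    have hp := hb p (List.mem_cons_self ..)
    have hg : PySem.List.pyGet? cards p.1 = some cards[p.1.toNat] :=
      PySem.List.pyGet?_eq_some_getElem cards hp.1.1 hp.1.2
    have hgd : PySem.List.pyGetD cards p.1 0 = cards[p.1.toNat] :=
      PySem.List.pyGetD_eq_getElem cards 0 hp.1.1 hp.1.2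
    rcases hset : PySem.List.pySet? acc p.2 cards[p.1.toNat] with _ | a
    · exfalso
      have := (PySem.List.pySet?_eq_none_iff ..).mp hset
      apply this
      unfold PySem.Raise.InRange
      have := hp.2
      omega
    · have hsd : PySem.List.pySetD acc p.2 (PySem.List.pyGetD cards p.1 0) = a := by
        rw [hgd]
        unfold PySem.List.pySetD
        rw [hset]
        rfl
      have hlen : a.length = acc.length := by
        have := PySem.List.length_pySetD acc p.2 (PySem.List.pyGetD cards p.1 0)
        rw [hsd] at this
        exact this
      simp only [pvShuffleA, hg, hset, List.foldl_cons, hsd]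
      apply ih
      intro q hq
      have := hb q (List.mem_cons_of_mem _ hq)
      rw [hlen]
      exact this

theorem pvLoop_agree {N : Int} {S : List Int} (hN : (S.length : Int) = N)
    (hr : ∀ x ∈ S, 0 ≤ x ∧ x < (S.length : Int)) (hnd : S.Nodup)
    (target : PySem.Dict Int (PySem.Set Int))
    (hacc : ∀ cards, pvAcceptA target (PySem.List.enumerate cards 0) = some (pvAcceptB target cards)) :
    ∀ (d t : Nat), t + d = pvLNat S →
    ∀ (v : PySem.Set (List Int)),
      (∀ y, PySem.Set.contains v y = true ↔ ∃ s < t, y = pvX N S s) →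
      pvLoopA target N S (Nat.factorial S.length + 2 - t) v (pvX N S t) (t : Int) =
        some (pvLoopB target N S d (pvX N S t) (t : Int)) := by
  obtain ⟨hLpos, hLle, hLper, hLmin⟩ := pvLNat_props hr hnd
  intro d
  induction d with
  | zero =>
    intro t ht v hv
    have htL : t = pvLNat S := by omega
    subst htL
    obtain ⟨f, hf⟩ : ∃ f, Nat.factorial S.length + 2 - pvLNat S = f + 1 :=
      ⟨Nat.factorial S.length + 1 - pvLNat S, by omega⟩
    rw [hf]
    have hX0 : pvX N S (pvLNat S) = pvX N S 0 :=
      (pvX_eq_zero_iff hN hr hnd _).mpr hLper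
    have hcont : PySem.Set.contains v (pvX N S (pvLNat S)) = true :=
      (hv _).mpr ⟨0, hLpos, hX0⟩
    simp only [pvLoopA, hcont, if_pos]
    rfl
  | succ d ih =>
    intro t ht v hv
    have htL : t < pvLNat S := by omega
    obtain ⟨f, hf⟩ : ∃ f, Nat.factorial S.length + 2 - t = f + 1 :=
      ⟨Nat.factorial S.length + 1 - t, by omega⟩
    rw [hf]
    have hcont : PySem.Set.contains v (pvX N S t) = false := by
      rcases hcv : PySem.Set.contains v (pvX N S t) with _ | _
      · rfl
      · exfalso
        obtain ⟨u, hu, hXu⟩ := (hv _).mp hcv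
        exact pvX_distinct hN hr hnd hu htL hXu
    simp only [pvLoopA, pvLoopB, hcont, Bool.false_eq_true, hacc (pvX N S t)]
    by_cases hb : pvAcceptB target (pvX N S t) = true
    · rw [hb]; simp
    · simp only [Bool.not_eq_true] at hb
      rw [hb]
      have hXlen : (pvX N S t).length = S.length := pvX_length hN t
      rw [pvShuffleA_eq hN hr _ hXlen]
      have hXsucc : pvShuffleB N S (pvX N S t) = pvX N S (t + 1) := by
        unfold pvX
        rw [Function.iterate_succ_apply']
      rw [hXsucc]
      have hfuel : f = Nat.factorial S.length + 2 - (t + 1) := by omega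
      have hv' : ∀ y, PySem.Set.contains (PySem.Set.add v (pvX N S t)) y = true ↔
          ∃ s < t + 1, y = pvX N S s := by
        intro y
        rw [PySem.Set.contains_iff, PySem.Set.mem_add]
        constructor
        · rintro (hy | hy)
          · obtain ⟨u, hu, rfl⟩ := (hv y).mp ((PySem.Set.contains_iff ..).mpr hy)
            exact ⟨u, by omega, rfl⟩
          · exact ⟨t, by omega, hy⟩
        · rintro ⟨u, hu, rfl⟩
          rcases Nat.lt_or_ge u t with h | h
          · exact Or.inl ((PySem.Set.contains_iff ..).mp ((hv _).mpr ⟨u, h, rfl⟩))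
          · have : u = t := by omega
            subst this
            exact Or.inr rfl
      have := ih (t + 1) (by omega) (PySem.Set.add v (pvX N S t)) hv'
      rw [hfuel]
      rw [show ((t : Int) + 1) = (((t + 1 : Nat)) : Int) by push_cast; ring]
      exact this

-- ===== VERDICT (by name: the statement is the Claim_ definition above) =====
theorem solution_spec : Claim_equal_solution := by
  intro N P S hdom hpre
  unfold Spec_solution solution solution_alt
  have htgt : pvTargetB P = pvTargetA P := rfl
  rw [htgt]
  by_cases hsz : (pvTargetA P).size ≠ 3
  · simp only [if_pos hsz]
  · simp only [if_neg hsz]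
    push_neg at hsz
    have hP3 : (PySem.Set.ofList P).length = 3 := by rw [← pvTargetA_size]; exact hsz
    rcases hpre with hpre | ⟨hN, hr0, hnd, h0, h1, h2⟩
    · exact absurd hP3 hpre
    · have hr : ∀ x ∈ S, 0 ≤ x ∧ x < (S.length : Int) := by
        intro x hx
        have := hr0 x hx
        omega
      have hk : ∀ k : Int, 0 ≤ k → k < 3 → ((pvTargetA P).get? k).isSome := by
        intro k hk0 hk3
        have : k = 0 ∨ k = 1 ∨ k = 2 := by omega
        rcases this with rfl | rfl | rfl
        · exact pvTargetA_isSome h0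
        · exact pvTargetA_isSome h1
        · exact pvTargetA_isSome h2
      have hacc := pvAccept_agree (pvTargetA P) hk
      have hempty : ∀ y, PySem.Set.contains (PySem.Set.empty : PySem.Set (List Int)) y = true ↔
          ∃ s < 0, y = pvX N S s := by
        intro y
        constructor
        · intro h
          exact absurd ((PySem.Set.contains_iff ..).mp h) (List.not_mem_nil)
        · rintro ⟨u, hu, -⟩
          omega
      have hloop := pvLoop_agree hN hr hnd (pvTargetA P) hacc (pvLNat S) 0 (by omega)
        PySem.Set.empty hempty
      have hX0 : pvX N S 0 = PySem.List.pyRange 0 N 1 := rfl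
      rw [hX0] at hloop
      rw [Nat.sub_zero] at hloop
      rw [show ((0 : Nat) : Int) = 0 from rfl] at hloop
      rw [hloop]
      have hord : (pvOrder N S).toNat = pvLNat S := by
        rw [← hN, pvOrder_eq hr hnd]
        exact Int.toNat_natCast _
      rw [hord]
      rfl
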